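-- pv_equiv track=rewrite | github.com/mindjun/hands_on_script | dp/some_dp_func.py | jump_ii
-- ===== SOURCE A (Python) =====
-- def jump_ii(nums):
--     size, step = len(nums), 0
--     position = size - 1
--
--     while position > 0:
--         # 我们可以从左到右遍历数组，选择第一个满足要求的位置
--         for i in range(position):
--             if i + nums[i] >= position:
--                 position = i
--                 step += 1
--                 break
--     return step
-- ===== SOURCE B (Python) =====
-- def jump_ii(nums):
--     n = len(nums)
--     # prefix maxima of i + nums[i]: pref[j] = max(i + nums[i] for i <= j)
--     pref = []
--     best = None
--     for i in range(n - 1):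
--         r = i + nums[i]
--         best = r if best is None or r > best else best
--         pref.append(best)
--     reach, step = 0, 0
--     while reach < n - 1:
--         reach = pref[reach]
--         step += 1
--     return step
-- ===== Notes on version B (the rewrite author's own statement) =====
-- stated objective: alternative
-- what changed: Replaced A's backward first-fit greedy (a fresh left-to-right scan for each new target position) by a forward BFS-layer jump over a prefix-maxima table built in one pass; Pre_ excludes exactly the inputs with an unreachable position, where A loops forever.
import Mathlib
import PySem

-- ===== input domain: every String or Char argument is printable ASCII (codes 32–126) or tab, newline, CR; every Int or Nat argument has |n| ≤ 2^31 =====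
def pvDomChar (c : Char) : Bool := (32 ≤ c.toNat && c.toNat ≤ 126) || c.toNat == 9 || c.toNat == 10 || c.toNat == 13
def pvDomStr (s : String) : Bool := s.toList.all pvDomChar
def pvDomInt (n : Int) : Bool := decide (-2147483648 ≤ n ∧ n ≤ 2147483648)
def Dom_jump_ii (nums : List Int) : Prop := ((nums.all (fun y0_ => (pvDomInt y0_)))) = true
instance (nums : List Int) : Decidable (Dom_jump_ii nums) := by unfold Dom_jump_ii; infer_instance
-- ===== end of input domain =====

-- B replaces A's backward first-fit greedy (a fresh scan per target position) by a forward
-- BFS-layer jump over a one-pass prefix-maxima table (objective: alternative algorithm).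

-- ===== PORT A =====
-- inner 'for i in range(position): if i + nums[i] >= position: ... break' = first i in [0,position) with i+nums[i] ≥ position
def jumpFind (nums : List Int) (position : Int) : Option Int :=
  (PySem.List.pyRange 0 position 1).find? (fun i => decide (i + PySem.List.pyGetD nums i 0 ≥ position))

-- the 'while position > 0' loop; fuel only guards totality (Python A loops forever when no i is found;
-- such inputs are excluded by Pre_jump_ii)
def jumpAuxA (nums : List Int) : Nat → Int → Int → Int
  | 0, _, step => step
  | fuel+1, position, step =>
    if position > 0 then
      match jumpFind nums position with
      | some i => jumpAuxA nums fuel i (step + 1)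
      | none => step
    else step

def jump_ii (nums : List Int) : Int :=
  jumpAuxA nums nums.length ((nums.length : Int) - 1) 0

-- ===== PORT B =====
-- 'for i in range(n-1): r = i + nums[i]; best = r if best is None or r > best else best; pref.append(best)'
def jumpPref (nums : List Int) : List Int :=
  ((PySem.List.pyRange 0 ((nums.length : Int) - 1) 1).foldl
    (fun (st : List Int × Option Int) i =>
      let r := i + PySem.List.pyGetD nums i 0
      let best := match st.2 with
        | none => r
        | some b => if r > b then r else b
      (st.1 ++ [best], some best)) ([], none)).1

-- 'while reach < n - 1: reach = pref[reach]; step += 1'; fuel only guards totality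
def jumpLoopB (pref : List Int) (n : Int) : Nat → Int → Int → Int
  | 0, _, step => step
  | fuel+1, reach, step =>
    if reach < n - 1 then
      jumpLoopB pref n fuel (PySem.List.pyGetD pref reach 0) (step + 1)
    else step

def jump_ii_alt (nums : List Int) : Int :=
  jumpLoopB (jumpPref nums) (nums.length : Int) nums.length 0 0

-- ===== PRECONDITION & SPEC =====
-- Pre_ excludes exactly the inputs on which Python A never returns: if some position k ∈ [1, n-1]
-- is reached by no earlier index (no i < k with i + nums[i] ≥ k), A's while loop runs forever.
def Pre_jump_ii (nums : List Int) : Prop :=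
  ∀ k : Nat, k < nums.length → 1 ≤ k → ∃ i : Nat, i < k ∧ (i : Int) + nums.getD i 0 ≥ (k : Int)
instance (nums : List Int) : Decidable (Pre_jump_ii nums) := by unfold Pre_jump_ii; infer_instance

def pvWitness_jump_ii : List Int := [2, 1, 1, 1]

def Spec_jump_ii (nums : List Int) (out : Int) : Prop := out = jump_ii_alt nums
instance (nums : List Int) (out : Int) : Decidable (Spec_jump_ii nums out) := by unfold Spec_jump_ii; infer_instance

-- ===== CLAIM (what is proved, stated in full; the proofs are below) =====
def Claim_equal_jump_ii : Prop := ∀ (nums : List Int), Dom_jump_ii nums → Pre_jump_ii nums → Spec_jump_ii nums (jump_ii nums)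

-- ===== LEMMAS AND PROOFS =====

-- reach value of index i
def rv (nums : List Int) (i : Nat) : Int := (i : Int) + nums.getD i 0

-- prefix maximum of rv over indices ≤ j
def pm (nums : List Int) : Nat → Int
  | 0 => rv nums 0
  | j+1 => max (pm nums j) (rv nums (j+1))

-- the forward frontier after s BFS layers (what B's loop iterates)
def ReachF (nums : List Int) : Nat → Int
  | 0 => 0
  | s+1 =>
    let r := ReachF nums s
    if r < (nums.length : Int) - 1 then pm nums r.toNat else r

theorem pm_ge (nums : List Int) {i j : Nat} (h : i ≤ j) : rv nums i ≤ pm nums j := by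
  induction j with
  | zero => simp_all [pm]
  | succ k ih =>
    rcases Nat.lt_or_ge i (k+1) with h' | h'
    · exact le_trans (ih (by omega)) (le_max_left _ _)
    · have : i = k + 1 := by omega
      subst this; exact le_max_right _ _

theorem pm_attained (nums : List Int) (j : Nat) : ∃ i ≤ j, pm nums j = rv nums i := by
  induction j with
  | zero => exact ⟨0, le_refl _, rfl⟩
  | succ k ih =>
    rcases ih with ⟨i, hi, hpm⟩
    rcases max_cases (pm nums k) (rv nums (k+1)) with ⟨h1, _⟩ | ⟨h1, _⟩
    · refine ⟨i, by omega, ?_⟩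
      show max (pm nums k) (rv nums (k+1)) = rv nums i
      rw [h1, hpm]
    · exact ⟨k+1, le_refl _, by simp [pm, h1]⟩

theorem pm_progress (nums : List Int) (hpre : Pre_jump_ii nums) {r : Int}
    (h0 : 0 ≤ r) (h1 : r < (nums.length : Int) - 1) : r + 1 ≤ pm nums r.toNat := by
  obtain ⟨i, hi, hrv⟩ := hpre (r.toNat + 1) (by omega) (by omega)
  calc r + 1 ≤ (i : Int) + nums.getD i 0 := by push_cast at hrv ⊢; omega
    _ ≤ pm nums r.toNat := pm_ge nums (by omega)

theorem Reach_nonneg (nums : List Int) (hpre : Pre_jump_ii nums) (s : Nat) :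
    0 ≤ ReachF nums s := by
  induction s with
  | zero => simp [ReachF]
  | succ k ih =>
    simp only [ReachF]
    split
    · have := pm_progress nums hpre ih (by assumption)
      omega
    · exact ih

theorem Reach_lower (nums : List Int) (hpre : Pre_jump_ii nums) (s : Nat) :
    (nums.length : Int) - 1 ≤ ReachF nums s ∨ (s : Int) ≤ ReachF nums s := by
  induction s with
  | zero => right; simp [ReachF]
  | succ k ih =>
    simp only [ReachF]
    split
    · rename_i hlt
      have h0 := Reach_nonneg nums hpre k
      have := pm_progress nums hpre h0 hlt
      rcases ih with h | h
      · omega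
      · right; push_cast; omega
    · rename_i hge
      left; omega

theorem exists_reach_ge (nums : List Int) (hpre : Pre_jump_ii nums) (p : Int)
    (hp : p ≤ (nums.length : Int) - 1) : ∃ s, p ≤ ReachF nums s := by
  refine ⟨nums.length, ?_⟩
  rcases Reach_lower nums hpre nums.length with h | h
  · omega
  · omega

theorem ls_le (nums : List Int) (hpre : Pre_jump_ii nums) (p : Int)
    (hp : p ≤ (nums.length : Int) - 1) :
    Nat.find (exists_reach_ge nums hpre p hp) ≤ nums.length := by
  apply Nat.find_le
  rcases Reach_lower nums hpre nums.length with h | h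
  · omega
  · omega

theorem Reach_stable (nums : List Int) {s t : Nat} (hst : s ≤ t)
    (h : (nums.length : Int) - 1 ≤ ReachF nums s) :
    (nums.length : Int) - 1 ≤ ReachF nums t := by
  induction t with
  | zero => have : s = 0 := by omega
            subst this; exact h
  | succ k ih =>
    rcases Nat.lt_or_ge s (k+1) with h' | h'
    · have hk := ih (by omega)
      simp only [ReachF]
      split
      · omega
      · exact hk
    · have : s = k + 1 := by omega
      subst this; exact h



-- ---- A side ----

theorem find?_range_first {pred : Nat → Bool} {q m : Nat} (hq : q < m)
    (hpq : pred q = true) (hmin : ∀ j < q, pred j = false) :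
    (List.range m).find? pred = some q := by
  have hsplit : m = q + (m - q) := by omega
  rw [hsplit, List.range_add, List.find?_append]
  have h1 : (List.range q).find? pred = none := by
    rw [List.find?_eq_none]
    intro x hx
    simp only [List.mem_range] at hx
    simp [hmin x hx]
  obtain ⟨t, ht⟩ : ∃ t, m - q = t + 1 := ⟨m - q - 1, by omega⟩
  rw [h1, ht, List.range_succ_eq_map]
  simp [hpq]

theorem jumpFind_eq_some (nums : List Int) {p : Int} (hp0 : 0 < p)
    (hex : ∃ k : Nat, p ≤ rv nums k) {q : Nat} (hqdef : q = Nat.find hex)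
    (hqlt : q < p.toNat) :
    jumpFind nums p = some (q : Int) := by
  unfold jumpFind
  rw [PySem.List.pyRange_one, List.find?_map]
  have hfn : ((fun i => decide (i + PySem.List.pyGetD nums i 0 ≥ p)) ∘ (fun k : Nat => (0 : Int) + ↑k))
      = fun k : Nat => decide (p ≤ rv nums k) := by
    funext k
    simp [Function.comp, PySem.List.pyGetD_natCast, rv, ge_iff_le, List.getD]
  rw [hfn, find?_range_first (q := q) (m := (p - 0).toNat) (by omega)
    (by rw [hqdef]; exact decide_eq_true (Nat.find_spec hex))
    (fun j hj => by
      rw [decide_eq_false_iff_not]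
      exact Nat.find_min hex (hqdef ▸ hj))]
  simp

theorem reach_step_iff (nums : List Int) (hpre : Pre_jump_ii nums) {p : Int}
    (hpn : p ≤ (nums.length : Int) - 1) {q : Nat}
    (hq : p ≤ rv nums q) (hqmin : ∀ j < q, ¬ p ≤ rv nums j) (hqlt : (q : Int) < p)
    (s : Nat) : p ≤ ReachF nums (s+1) ↔ (q : Int) ≤ ReachF nums s := by
  have h0 : 0 ≤ ReachF nums s := Reach_nonneg nums hpre s
  simp only [ReachF]
  split
  · constructor
    · intro hpm
      obtain ⟨i, hi, heq⟩ := pm_attained nums (ReachF nums s).toNat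
      have hpi : p ≤ rv nums i := heq ▸ hpm
      have hqi : q ≤ i := by
        by_contra hlt
        exact hqmin i (by omega) hpi
      omega
    · intro hqr
      have := pm_ge nums (i := q) (j := (ReachF nums s).toNat) (by omega)
      omega
  · rename_i hge
    rw [not_lt] at hge
    constructor
    · intro _; omega
    · intro _; omega

theorem ls_succ (nums : List Int) (hpre : Pre_jump_ii nums) {p : Int}
    (hp0 : 0 < p) (hpn : p ≤ (nums.length : Int) - 1) {q : Nat}
    (hq : p ≤ rv nums q) (hqmin : ∀ j < q, ¬ p ≤ rv nums j) (hqlt : (q : Int) < p)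
    (hqn : (q : Int) ≤ (nums.length : Int) - 1) :
    Nat.find (exists_reach_ge nums hpre p hpn)
      = Nat.find (exists_reach_ge nums hpre (q : Int) hqn) + 1 := by
  set t := Nat.find (exists_reach_ge nums hpre (q : Int) hqn) with ht
  rw [Nat.find_eq_iff]
  constructor
  · exact (reach_step_iff nums hpre hpn hq hqmin hqlt t).mpr
      (Nat.find_spec (exists_reach_ge nums hpre (q : Int) hqn))
  · intro s hs
    match s with
    | 0 => simp [ReachF]; omega
    | u+1 =>
      intro hcon
      have hu : (q : Int) ≤ ReachF nums u :=
        (reach_step_iff nums hpre hpn hq hqmin hqlt u).mp hcon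
      have := Nat.find_min (exists_reach_ge nums hpre (q : Int) hqn) (m := u) (by omega)
      exact this hu

theorem A_eval (nums : List Int) (hpre : Pre_jump_ii nums) :
    ∀ (fuel : Nat) (p : Int) (step : Int) (hpn : p ≤ (nums.length : Int) - 1),
    p.toNat ≤ fuel →
    jumpAuxA nums fuel p step = step + ↑(Nat.find (exists_reach_ge nums hpre p hpn)) := by
  intro fuel
  induction fuel with
  | zero =>
    intro p step hpn hf
    have hp0 : p ≤ 0 := by omega
    have : Nat.find (exists_reach_ge nums hpre p hpn) = 0 := by
      rw [Nat.find_eq_zero]; show p ≤ ReachF nums 0; simp [ReachF]; omega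
    simp [jumpAuxA, this]
  | succ fuel ih =>
    intro p step hpn hf
    by_cases hp : 0 < p
    · -- the inner scan finds the least q with rv q ≥ p
      have hex : ∃ k : Nat, p ≤ rv nums k := by
        obtain ⟨i, hi, hrv⟩ := hpre p.toNat (by omega) (by omega)
        exact ⟨i, by simp only [rv]; omega⟩
      set q := Nat.find hex with hqdef
      have hqspec : p ≤ rv nums q := Nat.find_spec hex
      have hqmin : ∀ j < q, ¬ p ≤ rv nums j := fun j hj => Nat.find_min hex hj
      have hqlt : q < p.toNat := by
        obtain ⟨i, hi, hrv⟩ := hpre p.toNat (by omega) (by omega)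
        have : q ≤ i := Nat.find_min' hex (by simp only [rv]; omega)
        omega
      have hqn : (q : Int) ≤ (nums.length : Int) - 1 := by omega
      have hfind := jumpFind_eq_some nums hp hex hqdef hqlt
      simp only [jumpAuxA, if_pos hp, hfind]
      rw [ih (q : Int) (step + 1) hqn (by omega)]
      rw [ls_succ nums hpre hp hpn hqspec hqmin (by omega) hqn]
      have : Nat.find (exists_reach_ge nums hpre (q : Int) (by omega : (q:Int) ≤ (nums.length : Int) - 1))
          = Nat.find (exists_reach_ge nums hpre (q : Int) hqn) := rfl
      push_cast
      ring
    · have hp0 : p ≤ 0 := by omega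
      have : Nat.find (exists_reach_ge nums hpre p hpn) = 0 := by
        rw [Nat.find_eq_zero]; show p ≤ ReachF nums 0; simp [ReachF]; omega
      simp [jumpAuxA, if_neg hp, this]

theorem jump_ii_eq (nums : List Int) (hpre : Pre_jump_ii nums)
    (hpn : (nums.length : Int) - 1 ≤ (nums.length : Int) - 1) :
    jump_ii nums = ↑(Nat.find (exists_reach_ge nums hpre ((nums.length : Int) - 1) hpn)) := by
  unfold jump_ii
  rw [A_eval nums hpre nums.length ((nums.length : Int) - 1) 0 hpn (by omega)]
  ring

-- ---- B side ----

theorem prefFold (nums : List Int) (m : Nat) :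
    (List.range m).foldl
      (fun (st : List Int × Option Int) (k : Nat) =>
        (st.1 ++ [match st.2 with
          | none => rv nums k
          | some b => if rv nums k > b then rv nums k else b],
         some (match st.2 with
          | none => rv nums k
          | some b => if rv nums k > b then rv nums k else b))) ([], none)
      = ((List.range m).map (pm nums), if m = 0 then none else some (pm nums (m-1))) := by
  induction m with
  | zero => rfl
  | succ k ih =>
    rw [List.range_succ, List.foldl_append, ih]
    simp only [List.foldl_cons, List.foldl_nil, List.map_append]
    match k with
    | 0 => simp [pm]
    | j+1 =>
      have hbest : (if pm nums j < rv nums (j+1) then rv nums (j+1) else pm nums j)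
          = pm nums (j+1) := by
        show _ = max (pm nums j) (rv nums (j+1))
        rcases le_or_gt (rv nums (j+1)) (pm nums j) with h | h
        · rw [if_neg (by omega), max_eq_left h]
        · rw [if_pos h, max_eq_right (by omega)]
      simp [hbest]

theorem jumpPref_eq (nums : List Int) :
    jumpPref nums = (List.range (nums.length - 1)).map (pm nums) := by
  unfold jumpPref
  rw [PySem.List.pyRange_one, List.foldl_map]
  have hfn : (fun (st : List Int × Option Int) (k : Nat) =>
      (fun (st : List Int × Option Int) (i : Int) =>
        let r := i + PySem.List.pyGetD nums i 0
        let best := match st.2 with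
          | none => r
          | some b => if r > b then r else b
        (st.1 ++ [best], some best)) st ((0 : Int) + ↑k))
      = (fun (st : List Int × Option Int) (k : Nat) =>
        (st.1 ++ [match st.2 with
          | none => rv nums k
          | some b => if rv nums k > b then rv nums k else b],
         some (match st.2 with
          | none => rv nums k
          | some b => if rv nums k > b then rv nums k else b))) := by
    funext st k
    simp [rv, PySem.List.pyGetD_natCast, List.getD]
  rw [hfn, prefFold]
  have : ((nums.length : Int) - 1 - 0).toNat = nums.length - 1 := by omega
  rw [this]

theorem pref_get (nums : List Int) {r : Int} (h0 : 0 ≤ r)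
    (h1 : r < (nums.length : Int) - 1) :
    PySem.List.pyGetD (jumpPref nums) r 0 = pm nums r.toNat := by
  rw [jumpPref_eq]
  have hlen : ((List.range (nums.length - 1)).map (pm nums)).length = nums.length - 1 := by simp
  rw [PySem.List.pyGetD_eq_getElem _ _ h0 (by rw [hlen]; omega)]
  simp

theorem B_eval (nums : List Int) (hpre : Pre_jump_ii nums)
    (hpn : (nums.length : Int) - 1 ≤ (nums.length : Int) - 1) :
    ∀ (fuel : Nat) (s : Nat) (step : Int),
    Nat.find (exists_reach_ge nums hpre ((nums.length : Int) - 1) hpn) ≤ s + fuel →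
    jumpLoopB (jumpPref nums) (nums.length : Int) fuel (ReachF nums s) step
      = step + ↑(Nat.find (exists_reach_ge nums hpre ((nums.length : Int) - 1) hpn) - s) := by
  set ls := Nat.find (exists_reach_ge nums hpre ((nums.length : Int) - 1) hpn) with hls
  intro fuel
  induction fuel with
  | zero =>
    intro s step hf
    have hreach : (nums.length : Int) - 1 ≤ ReachF nums s :=
      Reach_stable nums (by omega : ls ≤ s)
        (Nat.find_spec (exists_reach_ge nums hpre ((nums.length : Int) - 1) hpn))
    have : ls - s = 0 := by omega
    simp [jumpLoopB, this]
  | succ fuel ih =>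
    intro s step hf
    by_cases hlt : ReachF nums s < (nums.length : Int) - 1
    · have hsls : s < ls := by
        by_contra hge
        have := Reach_stable nums (by omega : ls ≤ s)
          (Nat.find_spec (exists_reach_ge nums hpre ((nums.length : Int) - 1) hpn))
        omega
      have hget : PySem.List.pyGetD (jumpPref nums) (ReachF nums s) 0 = ReachF nums (s+1) := by
        rw [pref_get nums (Reach_nonneg nums hpre s) hlt]
        simp [ReachF, if_pos hlt]
      simp only [jumpLoopB, if_pos hlt, hget]
      rw [ih (s+1) (step+1) (by omega)]
      have : (ls - s : Int) = ↑(ls - (s+1)) + 1 := by omega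
      push_cast at this ⊢
      omega
    · have hsle : ls ≤ s := Nat.find_le (by omega)
      have : ls - s = 0 := by omega
      simp [jumpLoopB, if_neg hlt, this]

theorem jump_ii_alt_eq (nums : List Int) (hpre : Pre_jump_ii nums)
    (hpn : (nums.length : Int) - 1 ≤ (nums.length : Int) - 1) :
    jump_ii_alt nums = ↑(Nat.find (exists_reach_ge nums hpre ((nums.length : Int) - 1) hpn)) := by
  have hB := B_eval nums hpre hpn nums.length 0 0 (by simpa using ls_le nums hpre _ hpn)
  rw [show ReachF nums 0 = (0 : Int) from rfl] at hB
  unfold jump_ii_alt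
  rw [hB]
  simp

-- ===== VERDICT (by name: the statement is the Claim_ definition above) =====
theorem jump_ii_spec : Claim_equal_jump_ii := by
  intro nums _ hpre
  have hpn : (nums.length : Int) - 1 ≤ (nums.length : Int) - 1 := le_refl _
  show jump_ii nums = jump_ii_alt nums
  rw [jump_ii_eq nums hpre hpn, jump_ii_alt_eq nums hpre hpn]
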